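-- pv_equiv track=rewrite | github.com/Kelsidavis/voynich | tools/score_blind_test.py | score_label
-- ===== SOURCE A (Python) =====
-- SECTION_HIT_DOMAINS = {
--     'H': {'BOTANICAL', 'MEDICAL'},      # Herbal
--     'Z': {'CELESTIAL'},                  # Zodiac
--     'B': {'BODY', 'MEDICAL'},            # Biological
--     'P': {'MEDICAL', 'BOTANICAL'},       # Pharmaceutical
-- }
--
-- SECTION_MISS_DOMAINS = {
--     'H': {'CELESTIAL'},
--     'Z': {'BOTANICAL', 'BODY'},
--     'B': {'CELESTIAL', 'BOTANICAL'},
--     'P': {'CELESTIAL'},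
-- }
--
-- def score_label(section: str, domains: str) -> str:
--     """
--     Score a single label as HIT, MISS, or AMBIG.
--
--     Args:
--         section: H, Z, B, or P
--         domains: comma-separated domain string (may be empty)
--
--     Returns: 'HIT', 'MISS', or 'AMBIG'
--     """
--     if not domains:
--         return 'AMBIG'
--
--     domain_set = set(d.strip() for d in domains.split(','))
--
--     # Check for hits first
--     hit_domains = SECTION_HIT_DOMAINS.get(section, set())
--     if domain_set & hit_domains:
--         return 'HIT'
--
--     # Check for misses
--     miss_domains = SECTION_MISS_DOMAINS.get(section, set())
--     if domain_set & miss_domains: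
--         return 'MISS'
--
--     # Everything else is ambiguous (e.g., VERB, TEMPORAL)
--     return 'AMBIG'
-- ===== SOURCE B (Python) =====
-- SECTION_HIT_DOMAINS = {
--     'H': {'BOTANICAL', 'MEDICAL'},
--     'Z': {'CELESTIAL'},
--     'B': {'BODY', 'MEDICAL'},
--     'P': {'MEDICAL', 'BOTANICAL'},
-- }
--
-- SECTION_MISS_DOMAINS = {
--     'H': {'CELESTIAL'},
--     'Z': {'BOTANICAL', 'BODY'},
--     'B': {'CELESTIAL', 'BOTANICAL'},
--     'P': {'CELESTIAL'},
-- }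
--
-- def score_label(section: str, domains: str) -> str:
--     if not domains:
--         return 'AMBIG'
--     hit = SECTION_HIT_DOMAINS.get(section, set())
--     miss = SECTION_MISS_DOMAINS.get(section, set())
--     saw_miss = False
--     for d in domains.split(','):
--         d = d.strip()
--         if d in hit:
--             return 'HIT'
--         if d in miss:
--             saw_miss = True
--     return 'MISS' if saw_miss else 'AMBIG'
-- ===== Notes on version B (the rewrite author's own statement) =====
-- stated objective: alternative
-- what changed: Replaces A's materialised set of stripped domains and two bulk set intersections with a single streaming scan that returns HIT on the first hit domain and maintains a saw_miss flag, deciding MISS/AMBIG after the loop.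
import Mathlib
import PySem

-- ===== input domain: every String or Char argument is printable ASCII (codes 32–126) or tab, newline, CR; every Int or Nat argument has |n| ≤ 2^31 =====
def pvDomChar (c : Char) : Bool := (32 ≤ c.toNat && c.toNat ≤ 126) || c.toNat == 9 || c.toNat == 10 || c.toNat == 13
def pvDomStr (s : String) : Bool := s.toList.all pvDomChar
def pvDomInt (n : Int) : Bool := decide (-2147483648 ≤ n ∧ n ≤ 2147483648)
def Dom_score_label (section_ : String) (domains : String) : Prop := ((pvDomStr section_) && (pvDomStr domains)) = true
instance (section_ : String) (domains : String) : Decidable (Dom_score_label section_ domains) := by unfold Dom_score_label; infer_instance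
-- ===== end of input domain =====

-- B replaces A's materialised stripped-domain set and two bulk set intersections with a single
-- streaming scan: early-return HIT on the first hit domain, a saw_miss flag decided after the loop.


-- ===== PORT A =====
-- s.split(",") with the nonempty literal separator: split? is always some; getD only totalises
def splitComma (s : String) : List String := (PySem.Str.split? s ",").getD []

def SECTION_HIT_DOMAINS : PySem.Dict String (PySem.Set String) :=
  PySem.Dict.ofList [("H", PySem.Set.ofList ["BOTANICAL", "MEDICAL"]),
   ("Z", PySem.Set.ofList ["CELESTIAL"]),
   ("B", PySem.Set.ofList ["BODY", "MEDICAL"]),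
   ("P", PySem.Set.ofList ["MEDICAL", "BOTANICAL"])]

def SECTION_MISS_DOMAINS : PySem.Dict String (PySem.Set String) :=
  PySem.Dict.ofList [("H", PySem.Set.ofList ["CELESTIAL"]),
   ("Z", PySem.Set.ofList ["BOTANICAL", "BODY"]),
   ("B", PySem.Set.ofList ["CELESTIAL", "BOTANICAL"]),
   ("P", PySem.Set.ofList ["CELESTIAL"])]

def score_label (section_ : String) (domains : String) : String :=
  if domains = "" then "AMBIG"
  else
    let domain_set := PySem.Set.ofList ((splitComma domains).map PySem.Str.strip)
    let hit_domains := PySem.Dict.getD SECTION_HIT_DOMAINS section_ PySem.Set.empty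
    if PySem.Set.inter domain_set hit_domains ≠ [] then "HIT"
    else
      let miss_domains := PySem.Dict.getD SECTION_MISS_DOMAINS section_ PySem.Set.empty
      if PySem.Set.inter domain_set miss_domains ≠ [] then "MISS"
      else "AMBIG"

-- ===== PORT B =====
-- the loop of Source B: early-return on a hit, carry the saw_miss flag
def scanDomains (hit miss : PySem.Set String) : List String → Bool → String
  | [], sawMiss => if sawMiss then "MISS" else "AMBIG"
  | d :: rest, sawMiss =>
    let d' := PySem.Str.strip d
    if PySem.Set.contains hit d' then "HIT"
    else scanDomains hit miss rest (sawMiss || PySem.Set.contains miss d')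

def score_label_alt (section_ : String) (domains : String) : String :=
  if domains = "" then "AMBIG"
  else
    let hit := PySem.Dict.getD SECTION_HIT_DOMAINS section_ PySem.Set.empty
    let miss := PySem.Dict.getD SECTION_MISS_DOMAINS section_ PySem.Set.empty
    scanDomains hit miss (splitComma domains) false

-- ===== PRECONDITION & SPEC =====
def Spec_score_label (section_ : String) (domains : String) (out : String) : Prop := out = score_label_alt section_ domains
instance (section_ : String) (domains : String) (out : String) : Decidable (Spec_score_label section_ domains out) := by unfold Spec_score_label; infer_instance

-- ===== CLAIM (what is proved, stated in full; the proofs are below) =====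
def Claim_equal_score_label : Prop := ∀ (section_ : String) (domains : String), Dom_score_label section_ domains → Spec_score_label section_ domains (score_label section_ domains)

-- ===== LEMMAS AND PROOFS =====

-- characterisation of the streaming scan by the two existential conditions A tests in bulk
theorem scanDomains_eq (hit miss : PySem.Set String) (l : List String) (sawMiss : Bool) :
    scanDomains hit miss l sawMiss =
      if ∃ d ∈ l, PySem.Str.strip d ∈ hit then "HIT"
      else if sawMiss = true ∨ ∃ d ∈ l, PySem.Str.strip d ∈ miss then "MISS"
      else "AMBIG" := by
  induction l generalizing sawMiss with
  | nil => simp [scanDomains]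
  | cons d rest ih =>
    simp only [scanDomains, List.mem_cons]
    by_cases hh : PySem.Str.strip d ∈ hit
    · simp [hh]
    · rw [if_neg (by simpa using hh), ih]
      by_cases hm : PySem.Str.strip d ∈ miss
      · simp [hh, hm]
      · simp [hh, hm]

-- nonemptiness of A's intersection = the existential the scan tests
theorem inter_ne_nil_iff (l : List String) (t : PySem.Set String) :
    (PySem.Set.inter (PySem.Set.ofList (l.map PySem.Str.strip)) t ≠ []) ↔
      ∃ d ∈ l, PySem.Str.strip d ∈ t := by
  rw [← List.isEmpty_eq_false_iff, List.isEmpty_eq_false_iff_exists_mem]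
  constructor
  · rintro ⟨x, hx⟩
    have := (PySem.Set.mem_inter _ _ _).mp hx
    obtain ⟨hs, ht⟩ := this
    have := (PySem.Set.mem_ofList _ _).mp hs
    obtain ⟨d, hd, rfl⟩ := List.mem_map.mp this
    exact ⟨d, hd, ht⟩
  · rintro ⟨d, hd, ht⟩
    exact ⟨PySem.Str.strip d, (PySem.Set.mem_inter _ _ _).mpr
      ⟨(PySem.Set.mem_ofList _ _).mpr (List.mem_map.mpr ⟨d, hd, rfl⟩), ht⟩⟩

-- ===== VERDICT (by name: the statement is the Claim_ definition above) =====
theorem score_label_spec : Claim_equal_score_label := by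
  intro section_ domains _
  unfold Spec_score_label score_label score_label_alt
  by_cases h0 : domains = ""
  · simp [h0]
  · simp only [h0, if_false]
    rw [scanDomains_eq]
    set l := splitComma domains
    set hit := PySem.Dict.getD SECTION_HIT_DOMAINS section_ PySem.Set.empty
    set miss := PySem.Dict.getD SECTION_MISS_DOMAINS section_ PySem.Set.empty
    by_cases hh : ∃ d ∈ l, PySem.Str.strip d ∈ hit
    · rw [if_pos ((inter_ne_nil_iff l hit).mpr hh), if_pos hh]
    · rw [if_neg (fun h => hh ((inter_ne_nil_iff l hit).mp h)), if_neg hh]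
      by_cases hm : ∃ d ∈ l, PySem.Str.strip d ∈ miss
      · rw [if_pos ((inter_ne_nil_iff l miss).mpr hm), if_pos (Or.inr hm)]
      · rw [if_neg (fun h => hm ((inter_ne_nil_iff l miss).mp h)),
            if_neg (by simpa using hm)]
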